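-- pv_equiv track=rewrite | github.com/thinktech20/sdg-reo-04-05-26 | uai3071390-genai-services-demand-generation-usecase/local/docs/dbx/reference/query_fsr_with_metadata.py | _choose_pdf_ref
-- ===== SOURCE A (Python) =====
-- from typing import Any, Dict, Iterable, List, Sequence, Tuple
--
-- def _normalize_pdf_key(value: Any) -> str:
--     text = str(value or "").strip()
--     text = text.replace("\\", "/")
--     if "/" in text:
--         text = text.rsplit("/", 1)[-1]
--     if text.lower().endswith(".pdf"):
--         text = text[:-4]
--     return text
--
-- def _lookup_ci(row: Dict[str, Any], *keys: str) -> Any: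
--     lowered = {str(key).lower(): value for key, value in row.items()}
--     for key in keys:
--         if key.lower() in lowered:
--             return lowered[key.lower()]
--     return None
--
-- def _choose_pdf_ref(chunk_row: Dict[str, Any], pdf_ref_rows: List[Dict[str, Any]]) -> Dict[str, Any] | None:
--     if not pdf_ref_rows:
--         return None
--
--     chunk_pdf_name = _normalize_pdf_key(_lookup_ci(chunk_row, "pdf_name") or "")
--     chunk_serial = str(_lookup_ci(chunk_row, "generator_serial", "esn") or "").strip()
--     exact_file_matches: List[Dict[str, Any]] = []
--     exact_file_and_esn_matches: List[Dict[str, Any]] = []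
--
--     for row in pdf_ref_rows:
--         row_pdf_name = _pdf_ref_file_key(row)
--         if row_pdf_name != chunk_pdf_name:
--             continue
--
--         exact_file_matches.append(row)
--         row_serial = str(_lookup_ci(row, "esn", "generator_serial") or "").strip()
--         if chunk_serial and row_serial == chunk_serial:
--             exact_file_and_esn_matches.append(row)
--
--     if exact_file_and_esn_matches:
--         return exact_file_and_esn_matches[0]
--     if exact_file_matches:
--         return exact_file_matches[0]
--     return pdf_ref_rows[0]
--
-- def _pdf_ref_file_key(row: Dict[str, Any]) -> str:
--     return _normalize_pdf_key(
--         _lookup_ci(row, "s3_filename", "filename", "pdf_name", "PDF_name") or ""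
--     )
-- ===== SOURCE B (Python) =====
-- # B: replaces A's collect-everything accumulation loop by two short-circuiting
-- # first-match searches (next over a generator), equal to taking [0] of A's lists.
--
-- def _normalize_pdf_key(value):
--     text = str(value or "").strip()
--     text = text.replace("\\", "/")
--     if "/" in text:
--         text = text.rsplit("/", 1)[-1]
--     if text.lower().endswith(".pdf"):
--         text = text[:-4]
--     return text
--
-- def _lookup_ci(row, *keys):
--     lowered = {str(key).lower(): value for key, value in row.items()}
--     for key in keys:
--         if key.lower() in lowered:
--             return lowered[key.lower()]
--     return None
--
-- def _pdf_ref_file_key(row):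
--     return _normalize_pdf_key(
--         _lookup_ci(row, "s3_filename", "filename", "pdf_name", "PDF_name") or ""
--     )
--
-- def _choose_pdf_ref(chunk_row, pdf_ref_rows):
--     if not pdf_ref_rows:
--         return None
--
--     chunk_pdf_name = _normalize_pdf_key(_lookup_ci(chunk_row, "pdf_name") or "")
--     chunk_serial = str(_lookup_ci(chunk_row, "generator_serial", "esn") or "").strip()
--
--     def file_match(row):
--         return _pdf_ref_file_key(row) == chunk_pdf_name
--
--     if chunk_serial:
--         hit = next(
--             (row for row in pdf_ref_rows
--              if file_match(row)
--              and str(_lookup_ci(row, "esn", "generator_serial") or "").strip() == chunk_serial),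
--             None,
--         )
--         if hit is not None:
--             return hit
--
--     hit = next((row for row in pdf_ref_rows if file_match(row)), None)
--     return hit if hit is not None else pdf_ref_rows[0]
-- ===== Notes on version B (the rewrite author's own statement) =====
-- stated objective: simpler
-- what changed: Replaces A's single loop that accumulates two full match lists (and then takes element [0]) with two direct short-circuiting first-match searches: next() over a file+esn generator, then next() over a file-only generator, then the pdf_ref_rows[0] fallback.
import Mathlib
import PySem

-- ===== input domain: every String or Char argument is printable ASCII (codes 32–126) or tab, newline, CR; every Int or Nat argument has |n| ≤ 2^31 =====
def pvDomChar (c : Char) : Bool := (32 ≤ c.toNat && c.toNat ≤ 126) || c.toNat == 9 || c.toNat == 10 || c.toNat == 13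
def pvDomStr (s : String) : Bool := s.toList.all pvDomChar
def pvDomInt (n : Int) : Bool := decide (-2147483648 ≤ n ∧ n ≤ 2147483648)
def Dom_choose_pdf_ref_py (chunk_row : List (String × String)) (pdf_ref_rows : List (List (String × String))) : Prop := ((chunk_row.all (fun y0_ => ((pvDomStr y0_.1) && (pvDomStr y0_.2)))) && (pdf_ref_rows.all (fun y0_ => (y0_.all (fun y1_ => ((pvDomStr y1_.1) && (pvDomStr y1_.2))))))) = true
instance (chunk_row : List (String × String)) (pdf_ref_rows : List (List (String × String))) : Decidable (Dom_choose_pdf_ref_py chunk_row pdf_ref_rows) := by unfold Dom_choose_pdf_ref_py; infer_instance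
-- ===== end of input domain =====

-- B replaces A's collect-every-match accumulation loop by two short-circuiting
-- first-match searches (objective: simpler); return values proved equal on all inputs.

-- ===== PORT A =====
-- shared module helpers (_lookup_ci, _normalize_pdf_key, _pdf_ref_file_key), used verbatim by both A and B

-- the 'for key in keys: if key.lower() in lowered: return lowered[key.lower()]' loop of _lookup_ci
def pvTryKeys (lowered : PySem.Dict String String) : List String → Option String
  | [] => none
  | k :: rest =>
      let lk := PySem.Str.lower k
      if lowered.contains lk then lowered.get? lk else pvTryKeys lowered rest

def pvLookupCi (row : List (String × String)) (keys : List String) : Option String :=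
  -- {str(key).lower(): value for key, value in row.items()}: duplicates keep first position, last value = Dict.insert
  let lowered := row.foldl (fun d kv => d.insert (PySem.Str.lower kv.1) kv.2) PySem.Dict.empty
  pvTryKeys lowered keys

def pvNormalizePdfKey (value : String) : String :=
  -- str(value or "") on a str argument is the argument itself ("" stays "")
  let text := PySem.Str.strip value
  let text := PySem.Str.replace text "\\" "/"
  let text :=
    if PySem.Str.isIn "/" text then
      -- text.rsplit("/", 1)[-1]: the suffix after the LAST "/" (exact here since "/" occurs in text, so rfind ≥ 0)
      PySem.Str.slice text (some (PySem.Str.rfind text "/" + 1)) none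
    else text
  if PySem.Str.endswith (PySem.Str.lower text) ".pdf" then
    PySem.Str.slice text none (some (-4))   -- text[:-4]
  else text

def pvPdfRefFileKey (row : List (String × String)) : String :=
  pvNormalizePdfKey ((pvLookupCi row ["s3_filename", "filename", "pdf_name", "PDF_name"]).getD "")

def pvRowSerial (row : List (String × String)) : String :=
  PySem.Str.strip ((pvLookupCi row ["esn", "generator_serial"]).getD "")

-- one iteration of A's 'for row in pdf_ref_rows' loop over the two accumulator lists
def pvStepA (chunkName chunkSerial : String)
    (acc : List (List (String × String)) × List (List (String × String)))
    (row : List (String × String)) :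
    List (List (String × String)) × List (List (String × String)) :=
  let rowName := pvPdfRefFileKey row
  if rowName != chunkName then acc
  else
    let exactFile := acc.1 ++ [row]
    let rowSerial := pvRowSerial row
    if (chunkSerial != "") && (rowSerial == chunkSerial) then (exactFile, acc.2 ++ [row])
    else (exactFile, acc.2)

def choose_pdf_ref_py (chunk_row : List (String × String)) (pdf_ref_rows : List (List (String × String))) : Option (List (String × String)) :=
  if pdf_ref_rows = [] then none
  else
    let chunkName := pvNormalizePdfKey ((pvLookupCi chunk_row ["pdf_name"]).getD "")
    let chunkSerial := PySem.Str.strip ((pvLookupCi chunk_row ["generator_serial", "esn"]).getD "")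
    let r := pdf_ref_rows.foldl (pvStepA chunkName chunkSerial) ([], [])
    if r.2 ≠ [] then PySem.List.pyGet? r.2 0
    else if r.1 ≠ [] then PySem.List.pyGet? r.1 0
    else PySem.List.pyGet? pdf_ref_rows 0

-- ===== PORT B =====
def choose_pdf_ref_py_alt (chunk_row : List (String × String)) (pdf_ref_rows : List (List (String × String))) : Option (List (String × String)) :=
  if pdf_ref_rows = [] then none
  else
    let chunkName := pvNormalizePdfKey ((pvLookupCi chunk_row ["pdf_name"]).getD "")
    let chunkSerial := PySem.Str.strip ((pvLookupCi chunk_row ["generator_serial", "esn"]).getD "")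
    let fileMatch := fun row => pvPdfRefFileKey row == chunkName
    -- the code after the serial block: next((row … if file_match(row)), None) with the [0] fallback
    let fileHit := fun (_ : Unit) =>
      match pdf_ref_rows.find? fileMatch with
      | some hit => some hit
      | none => PySem.List.pyGet? pdf_ref_rows 0
    if chunkSerial != "" then
      match pdf_ref_rows.find? (fun row => fileMatch row && (pvRowSerial row == chunkSerial)) with
      | some hit => some hit
      | none => fileHit ()
    else fileHit ()

-- ===== PRECONDITION & SPEC =====
def Spec_choose_pdf_ref_py (chunk_row : List (String × String)) (pdf_ref_rows : List (List (String × String))) (out : Option (List (String × String))) : Prop := out = choose_pdf_ref_py_alt chunk_row pdf_ref_rows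
instance (chunk_row : List (String × String)) (pdf_ref_rows : List (List (String × String))) (out : Option (List (String × String))) : Decidable (Spec_choose_pdf_ref_py chunk_row pdf_ref_rows out) := by unfold Spec_choose_pdf_ref_py; infer_instance

-- ===== CLAIM (what is proved, stated in full; the proofs are below) =====
def Claim_equal_choose_pdf_ref_py : Prop := ∀ (chunk_row : List (String × String)) (pdf_ref_rows : List (List (String × String))), Dom_choose_pdf_ref_py chunk_row pdf_ref_rows → Spec_choose_pdf_ref_py chunk_row pdf_ref_rows (choose_pdf_ref_py chunk_row pdf_ref_rows)

-- ===== LEMMAS AND PROOFS =====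

-- A's accumulation loop collects exactly the two filters, appended to the incoming accumulator
theorem pvFoldA_eq (n s : String) (rows : List (List (String × String)))
    (acc : List (List (String × String)) × List (List (String × String))) :
    rows.foldl (pvStepA n s) acc
      = (acc.1 ++ rows.filter (fun r => pvPdfRefFileKey r == n),
         acc.2 ++ rows.filter (fun r => (pvPdfRefFileKey r == n) && ((s != "") && (pvRowSerial r == s)))) := by
  induction rows generalizing acc with
  | nil => simp
  | cons r rows ih =>
      simp only [List.foldl_cons, List.filter_cons, ih]
      unfold pvStepA
      by_cases h1 : pvPdfRefFileKey r = n
      · by_cases h2 : s = ""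
        · simp [h1, h2]
        · by_cases h3 : pvRowSerial r = s <;> simp [h1, h2, h3]
      · simp [h1]

theorem pvHead?_filter {α : Type} (p : α → Bool) : ∀ xs : List α, (xs.filter p).head? = xs.find? p
  | [] => rfl
  | x :: xs => by
      simp only [List.filter_cons, List.find?_cons]
      cases h : p x <;> simp [pvHead?_filter p xs]

theorem pvPyGet?_zero {α : Type} (xs : List α) : PySem.List.pyGet? xs 0 = xs.head? := by
  cases xs <;> simp [PySem.List.pyGet?, PySem.List.pyIdx?]

-- equality of the file-only fallthrough: A's 'exact_file_matches' branch = B's fileHit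
theorem pvFileBranch_eq (n : String) (rows : List (List (String × String))) :
    (if rows.filter (fun r => pvPdfRefFileKey r == n) ≠ [] then
        PySem.List.pyGet? (rows.filter (fun r => pvPdfRefFileKey r == n)) 0
      else PySem.List.pyGet? rows 0)
      = (match rows.find? (fun r => pvPdfRefFileKey r == n) with
         | some hit => some hit
         | none => PySem.List.pyGet? rows 0) := by
  cases hfind : rows.find? (fun r => pvPdfRefFileKey r == n) with
  | none =>
      have hfe : rows.filter (fun r => pvPdfRefFileKey r == n) = [] := by
        have h := pvHead?_filter (fun r => pvPdfRefFileKey r == n) rows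
        rw [hfind] at h
        exact List.head?_eq_none_iff.mp h
      simp [hfe]
  | some hit =>
      have h := pvHead?_filter (fun r => pvPdfRefFileKey r == n) rows
      rw [hfind] at h
      have hne : rows.filter (fun r => pvPdfRefFileKey r == n) ≠ [] := by
        intro he; rw [he] at h; simp at h
      simp [hne, pvPyGet?_zero, h]

-- ===== VERDICT (by name: the statement is the Claim_ definition above) =====
theorem choose_pdf_ref_py_spec : Claim_equal_choose_pdf_ref_py := by
  intro cr rows _
  unfold Spec_choose_pdf_ref_py choose_pdf_ref_py choose_pdf_ref_py_alt
  by_cases hnil : rows = []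
  · simp [hnil]
  · simp only [if_neg hnil, pvFoldA_eq, List.nil_append]
    set n := pvNormalizePdfKey ((pvLookupCi cr ["pdf_name"]).getD "") with hn
    set s := PySem.Str.strip ((pvLookupCi cr ["generator_serial", "esn"]).getD "") with hs
    by_cases hs0 : s = ""
    · -- no chunk serial: the esn filter is empty, B skips straight to the file search
      simp only [hs0, bne_self_eq_false, Bool.false_and, Bool.and_false, List.filter_false,
        ne_eq, not_true_eq_false, if_false]
      exact pvFileBranch_eq n rows
    · have hsb : (s != "") = true := bne_iff_ne.mpr hs0
      simp only [hsb, Bool.true_and]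
      cases hq : rows.find? (fun r => (pvPdfRefFileKey r == n) && (pvRowSerial r == s)) with
      | none =>
          have hfe : rows.filter (fun r => (pvPdfRefFileKey r == n) && (pvRowSerial r == s)) = [] := by
            have h := pvHead?_filter (fun r => (pvPdfRefFileKey r == n) && (pvRowSerial r == s)) rows
            rw [hq] at h
            exact List.head?_eq_none_iff.mp h
          simp only [hfe, ne_eq, not_true_eq_false, if_false]
          exact pvFileBranch_eq n rows
      | some hit =>
          have h := pvHead?_filter (fun r => (pvPdfRefFileKey r == n) && (pvRowSerial r == s)) rows
          rw [hq] at h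
          have hne : rows.filter (fun r => (pvPdfRefFileKey r == n) && (pvRowSerial r == s)) ≠ [] := by
            intro he; rw [he] at h; simp at h
          simp [hne, pvPyGet?_zero, h]
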